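-- pv_equiv track=rewrite | github.com/hassan11196/A2rchi | interfaces/chat_app.py | convert_to_app_history
-- ===== SOURCE A (Python) =====
-- def convert_to_app_history(history):
--     """
--     Input: the history in the form of a list of tuples, where the first entry of each tuple is
--     the author of the text and the second entry is the text itself (native A2rchi history format)
--
--     Output: the history in the form of a list of tuples, where the first entry of each tuple is
--     a question and the second is the response texts (chat format).
--     """
--
--     app_history = []
--     i = 0
--     while i < len(history):
--         if i+1 < len(history) and  history[i][0] != "A2rchi" and history[i+1][0] == "A2rchi":
--             app_history.append((history[i][1], history[i+1][1]))
--             i += 2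
--         elif history[i][0] != "A2rchi":
--             app_history.append((history[i][1], None))
--             i += 1
--         elif history[i][0] == "A2rchi":
--             app_history.append((None, history[i][1]))
--             i += 1
--     return app_history
-- ===== SOURCE B (Python) =====
-- def convert_to_app_history(history):
--     app_history = []
--     pending = None
--     for author, text in history:
--         if author != "A2rchi":
--             if pending is not None:
--                 app_history.append((pending, None))
--             pending = text
--         else:
--             if pending is not None:
--                 app_history.append((pending, text))
--                 pending = None
--             else:
--                 app_history.append((None, text))
--     if pending is not None:
--         app_history.append((pending, None))
--     return app_history
-- ===== Notes on version B (the rewrite author's own statement) =====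
-- stated objective: simpler
-- what changed: Replaced the index-based while loop with +1/+2 steps and lookahead at history[i+1] by a single forward for-loop that maintains a pending question and flushes it when paired, superseded, or at the end.
import Mathlib
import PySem

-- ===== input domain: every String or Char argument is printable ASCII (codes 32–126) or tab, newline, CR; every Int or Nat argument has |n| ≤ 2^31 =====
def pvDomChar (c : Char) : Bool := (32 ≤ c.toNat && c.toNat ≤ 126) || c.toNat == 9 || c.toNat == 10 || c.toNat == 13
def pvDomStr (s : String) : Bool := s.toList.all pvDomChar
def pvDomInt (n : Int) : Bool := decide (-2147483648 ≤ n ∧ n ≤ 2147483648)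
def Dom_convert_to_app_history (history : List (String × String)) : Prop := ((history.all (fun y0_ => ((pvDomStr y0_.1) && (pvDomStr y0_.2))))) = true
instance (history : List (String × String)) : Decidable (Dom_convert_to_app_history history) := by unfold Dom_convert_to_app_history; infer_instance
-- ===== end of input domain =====

-- B replaces A's index-based while loop with lookahead by a single forward pass maintaining a pending question (objective: simpler).


-- ===== PORT A =====
-- literal transliteration of A's while loop as recursion with one-element lookahead
def convert_to_app_history (history : List (String × String)) : List (Option String × Option String) :=
  match history with
  | [] => []
  | (a1, t1) :: (a2, t2) :: rest =>
    if a1 ≠ "A2rchi" ∧ a2 = "A2rchi" then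
      (some t1, some t2) :: convert_to_app_history rest
    else if a1 ≠ "A2rchi" then
      (some t1, none) :: convert_to_app_history ((a2, t2) :: rest)
    else
      (none, some t1) :: convert_to_app_history ((a2, t2) :: rest)
  | [(a1, t1)] =>
    if a1 ≠ "A2rchi" then [(some t1, none)] else [(none, some t1)]

-- ===== PORT B =====
-- one pass with a pending question (B)
def pvStepB (s : List (Option String × Option String) × Option String) (m : String × String) :
    List (Option String × Option String) × Option String :=
  if m.1 ≠ "A2rchi" then
    match s.2 with
    | some q => (s.1 ++ [(some q, none)], some m.2)
    | none   => (s.1, some m.2)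
  else
    match s.2 with
    | some q => (s.1 ++ [(some q, some m.2)], none)
    | none   => (s.1 ++ [(none, some m.2)], none)

def pvFinishB (s : List (Option String × Option String) × Option String) :
    List (Option String × Option String) :=
  match s.2 with
  | some q => s.1 ++ [(some q, none)]
  | none   => s.1

def convert_to_app_history_alt (history : List (String × String)) : List (Option String × Option String) :=
  pvFinishB (history.foldl pvStepB ([], none))

-- ===== PRECONDITION & SPEC =====
def Spec_convert_to_app_history (history : List (String × String)) (out : List (Option String × Option String)) : Prop := out = convert_to_app_history_alt history
instance (history : List (String × String)) (out : List (Option String × Option String)) : Decidable (Spec_convert_to_app_history history out) := by unfold Spec_convert_to_app_history; infer_instance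

-- ===== CLAIM (what is proved, stated in full; the proofs are below) =====
def Claim_equal_convert_to_app_history : Prop := ∀ (history : List (String × String)), Dom_convert_to_app_history history → Spec_convert_to_app_history history (convert_to_app_history history)

-- ===== LEMMAS AND PROOFS =====

-- A's behaviour when a question q is pending
def pvArun : Option String → List (String × String) → List (Option String × Option String)
  | none, h => convert_to_app_history h
  | some q, [] => [(some q, none)]
  | some q, (a, t) :: rest =>
    if a = "A2rchi" then (some q, some t) :: convert_to_app_history rest
    else (some q, none) :: convert_to_app_history ((a, t) :: rest)

theorem convA_cons (a t : String) (rest : List (String × String)) :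
    convert_to_app_history ((a, t) :: rest) =
      if a = "A2rchi" then (none, some t) :: convert_to_app_history rest
      else pvArun (some t) rest := by
  cases rest with
  | nil => by_cases h : a = "A2rchi" <;> simp [convert_to_app_history, pvArun, h]
  | cons p r =>
    obtain ⟨a2, t2⟩ := p
    by_cases h : a = "A2rchi" <;> by_cases h2 : a2 = "A2rchi" <;>
      simp [convert_to_app_history, pvArun, h, h2]

theorem foldB_eq (hist : List (String × String)) :
    ∀ (acc : List (Option String × Option String)) (pending : Option String),
      pvFinishB (hist.foldl pvStepB (acc, pending)) = acc ++ pvArun pending hist := by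
  induction hist with
  | nil =>
    intro acc pending
    cases pending <;> simp [pvFinishB, pvArun, convert_to_app_history]
  | cons m rest ih =>
    intro acc pending
    obtain ⟨a, t⟩ := m
    by_cases h : a = "A2rchi"
    · cases pending with
      | none =>
        rw [List.foldl_cons,
          show pvStepB (acc, none) (a, t) = (acc ++ [(none, some t)], none) by
            simp [pvStepB, h],
          ih]
        simp only [pvArun]
        rw [convA_cons, if_pos h]
        simp
      | some q =>
        rw [List.foldl_cons,
          show pvStepB (acc, some q) (a, t) = (acc ++ [(some q, some t)], none) by
            simp [pvStepB, h],
          ih]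
        simp only [pvArun]
        rw [if_pos h]
        simp
    · cases pending with
      | none =>
        rw [List.foldl_cons,
          show pvStepB (acc, none) (a, t) = (acc, some t) by simp [pvStepB, h],
          ih]
        simp only [pvArun]
        rw [convA_cons, if_neg h]
        rfl
      | some q =>
        rw [List.foldl_cons,
          show pvStepB (acc, some q) (a, t) = (acc ++ [(some q, none)], some t) by
            simp [pvStepB, h],
          ih]
        simp only [pvArun]
        rw [if_neg h, convA_cons, if_neg h]
        simp
        rfl

-- ===== VERDICT (by name: the statement is the Claim_ definition above) =====
theorem convert_to_app_history_spec : Claim_equal_convert_to_app_history := by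
  intro history _
  unfold Spec_convert_to_app_history convert_to_app_history_alt
  have h := foldB_eq history [] none
  simpa [pvArun] using h.symm
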